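-- pv_equiv track=rewrite | github.com/murilo-1234/winegod-app | sdk/plugs/commerce_dq_v3/artifact_exporters/tier1_global.py | _host_eligible
-- ===== SOURCE A (Python) =====
-- def _host_eligible(fonte_host: str | None, loja_hosts: set[str]) -> bool:
--     if not fonte_host:
--         return False
--     if fonte_host in loja_hosts:
--         return True
--     for h in loja_hosts:
--         if fonte_host.endswith("." + h):
--             return True
--     return False
-- ===== SOURCE B (Python) =====
-- def _suffixes(s):
--     # all dot-delimited proper suffixes of s (the part after each '.'), plus s itself
--     out = [s]
--     for i, c in enumerate(s):
--         if c == ".":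
--             out.append(s[i + 1:])
--     return out
--
--
-- def _host_eligible(fonte_host, loja_hosts):
--     return bool(fonte_host) and any(t in loja_hosts for t in _suffixes(fonte_host))
-- ===== Notes on version B (the rewrite author's own statement) =====
-- stated objective: alternative
-- what changed: B never iterates over loja_hosts: it first builds the list of dot-delimited suffixes of fonte_host in one pass (a data-building stage), then checks with any() whether one of them is in the set, replacing A's per-host endswith scan.
import Mathlib
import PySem

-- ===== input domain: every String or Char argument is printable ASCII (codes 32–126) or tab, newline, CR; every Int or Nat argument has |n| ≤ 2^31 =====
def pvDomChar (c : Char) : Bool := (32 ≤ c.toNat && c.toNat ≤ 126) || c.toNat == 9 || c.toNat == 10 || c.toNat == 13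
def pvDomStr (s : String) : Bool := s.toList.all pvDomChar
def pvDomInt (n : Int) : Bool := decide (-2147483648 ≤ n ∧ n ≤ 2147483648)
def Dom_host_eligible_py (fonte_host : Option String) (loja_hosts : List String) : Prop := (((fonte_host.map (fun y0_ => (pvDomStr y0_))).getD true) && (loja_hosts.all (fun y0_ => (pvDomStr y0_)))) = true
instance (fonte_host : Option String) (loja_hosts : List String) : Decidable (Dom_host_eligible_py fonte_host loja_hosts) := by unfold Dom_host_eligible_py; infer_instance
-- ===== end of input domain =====

-- B never iterates over loja_hosts: it builds the list of dot-delimited suffixes of fonte_host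
-- in one pass and then checks with any() whether one is in the set; return values are identical.

-- ===== PORT A =====
-- 'for h in loja_hosts: if fonte_host.endswith("." + h): return True' / 'return False'
def pvALoop (s : String) : List String → Bool
  | [] => false
  | h :: rest => if PySem.Str.endswith s ("." ++ h) then true else pvALoop s rest

def host_eligible_py (fonte_host : Option String) (loja_hosts : List String) : Bool :=
  match fonte_host with
  | none => false
  | some s =>
    if s = "" then false
    else if PySem.Set.contains loja_hosts s then true
    else pvALoop s loja_hosts

-- ===== PORT B =====
-- '_suffixes': 'out = [s]; for i, c in enumerate(s): if c == ".": out.append(s[i+1:]); return out'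
-- (structural recursion over the characters: the remainder list IS s[i+1:])
def pvSufAux : List Char → List String
  | [] => []
  | c :: rest => if c = '.' then String.ofList rest :: pvSufAux rest else pvSufAux rest

def pvSuffixes (s : String) : List String := s :: pvSufAux s.toList

-- 'return bool(fonte_host) and any(t in loja_hosts for t in _suffixes(fonte_host))'
def host_eligible_py_alt (fonte_host : Option String) (loja_hosts : List String) : Bool :=
  match fonte_host with
  | none => false
  | some s => (!(s = "")) && (pvSuffixes s).any (fun t => PySem.Set.contains loja_hosts t)

-- ===== PRECONDITION & SPEC =====
def Spec_host_eligible_py (fonte_host : Option String) (loja_hosts : List String) (out : Bool) : Prop := out = host_eligible_py_alt fonte_host loja_hosts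
instance (fonte_host : Option String) (loja_hosts : List String) (out : Bool) : Decidable (Spec_host_eligible_py fonte_host loja_hosts out) := by unfold Spec_host_eligible_py; infer_instance

-- ===== CLAIM (what is proved, stated in full; the proofs are below) =====
def Claim_equal_host_eligible_py : Prop := ∀ (fonte_host : Option String) (loja_hosts : List String), Dom_host_eligible_py fonte_host loja_hosts → Spec_host_eligible_py fonte_host loja_hosts (host_eligible_py fonte_host loja_hosts)

-- ===== LEMMAS AND PROOFS =====

-- A's loop fires iff some listed host is a '.'-preceded suffix of s
theorem pvALoop_iff (s : String) (L : List String) :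
    pvALoop s L = true ↔ ∃ h ∈ L, ('.' :: h.toList) <:+ s.toList := by
  induction L with
  | nil => simp [pvALoop]
  | cons h rest ih =>
    simp only [pvALoop]
    split_ifs with hh
    · have := (PySem.Chars.endswith_iff (s := s.toList) (p := ("." ++ h).toList)).mp (by
        simpa using hh)
      simp only [String.toList_append] at this
      constructor
      · intro _; exact ⟨h, by simp, by simpa using this⟩
      · intro _; rfl
    · have hh' : ¬ ('.' :: h.toList) <:+ s.toList := by
        intro hsuf
        apply hh
        have : PySem.Chars.endswith s.toList ("." ++ h).toList = true :=
          (PySem.Chars.endswith_iff _ _).mpr (by simpa using hsuf)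
        simpa using this
      rw [ih]
      constructor
      · rintro ⟨x, hx, hs⟩; exact ⟨x, by simp [hx], hs⟩
      · rintro ⟨x, hx, hs⟩
        rcases List.mem_cons.mp hx with rfl | hx'
        · exact absurd hs hh'
        · exact ⟨x, hx', hs⟩

-- B's suffix list holds exactly the '.'-preceded suffixes
theorem mem_pvSufAux (cs : List Char) (t : String) :
    t ∈ pvSufAux cs ↔ ('.' :: t.toList) <:+ cs := by
  induction cs with
  | nil =>
    simp only [pvSufAux]
    constructor
    · intro h; cases h
    · intro hs
      exact absurd (List.eq_nil_of_suffix_nil hs) (by simp)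
  | cons c rest ih =>
    simp only [pvSufAux]
    split_ifs with hc
    · subst hc
      simp only [List.mem_cons, ih]
      constructor
      · rintro (rfl | hs)
        · exact ⟨[], by simp⟩
        · exact hs.trans (List.suffix_cons '.' rest)
      · intro hs
        rcases List.suffix_cons_iff.mp hs with heq | hs'
        · left
          have h2 : t.toList = rest := by
            have := (List.cons.injEq _ _ _ _).mp heq
            exact this.2
          rw [← h2, String.ofList_toList]
        · right; exact hs'
    · rw [ih]
      constructor
      · intro hs; exact hs.trans (List.suffix_cons c rest)
      · intro hs
        rcases List.suffix_cons_iff.mp hs with heq | hs'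
        · exfalso
          exact hc ((List.cons.injEq _ _ _ _).mp heq).1.symm
        · exact hs'

-- hence A's scan over the set equals B's scan over the suffix list
theorem pvScan_eq (s : String) (L : List String) :
    pvALoop s L = (pvSufAux s.toList).any (fun t => PySem.Set.contains L t) := by
  by_cases h : ∃ x ∈ L, ('.' :: x.toList) <:+ s.toList
  · rw [(pvALoop_iff s L).mpr h]
    obtain ⟨x, hx, hs⟩ := h
    symm
    rw [List.any_eq_true]
    exact ⟨x, (mem_pvSufAux _ _).mpr hs, by simpa [PySem.Set.contains] using hx⟩
  · rw [Bool.eq_false_iff.mpr (fun hc => h ((pvALoop_iff s L).mp hc))]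
    symm
    rw [Bool.eq_false_iff]
    intro hc
    rcases List.any_eq_true.mp hc with ⟨t, ht, hmem⟩
    exact h ⟨t, by simpa [PySem.Set.contains] using hmem, (mem_pvSufAux _ _).mp ht⟩

-- ===== VERDICT (by name: the statement is the Claim_ definition above) =====
theorem host_eligible_py_spec : Claim_equal_host_eligible_py := by
  intro fonte_host loja_hosts _
  unfold Spec_host_eligible_py host_eligible_py host_eligible_py_alt
  cases fonte_host with
  | none => rfl
  | some s =>
    dsimp only
    by_cases h1 : s = ""
    · simp [h1, pvSuffixes]
    · simp only [h1, if_false, decide_false, Bool.not_false, Bool.true_and,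
        pvSuffixes, List.any_cons]
      rw [pvScan_eq s loja_hosts]
      simp [PySem.Set.contains]
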